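-- pv_equiv track=rewrite | github.com/lanshan-fs/industry | backend_django/system_api/views.py | _unique_column_labels
-- ===== SOURCE A (Python) =====
-- def _unique_column_labels(columns: list[dict]) -> list[dict]:
--     seen: dict[str, int] = {}
--     for column in columns:
--         label = column["label"]
--         count = seen.get(label, 0) + 1
--         seen[label] = count
--         column["import_label"] = label if count == 1 else f"{label}（{count}）"
--     return columns
-- ===== SOURCE B (Python) =====
-- def _unique_column_labels(columns: list[dict]) -> list[dict]:
--     # Label-major two-phase approach: collect the distinct labels in first-occurrence
--     # order, then for each label renumber its occurrences across the whole list.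
--     for label in dict.fromkeys(column["label"] for column in columns):
--         occurrence = 0
--         for column in columns:
--             if column["label"] == label:
--                 occurrence += 1
--                 column["import_label"] = label if occurrence == 1 else f"{label}（{occurrence}）"
--     return columns
-- ===== Notes on version B (the rewrite author's own statement) =====
-- stated objective: alternative
-- what changed: B replaces A's single streaming pass with a running `seen` counter dict by a label-major two-phase algorithm: phase 1 collects the distinct labels in first-occurrence order (dict.fromkeys), phase 2 makes one sweep per distinct label renumbering that label's occurrences with a local counter.
import Mathlib
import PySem

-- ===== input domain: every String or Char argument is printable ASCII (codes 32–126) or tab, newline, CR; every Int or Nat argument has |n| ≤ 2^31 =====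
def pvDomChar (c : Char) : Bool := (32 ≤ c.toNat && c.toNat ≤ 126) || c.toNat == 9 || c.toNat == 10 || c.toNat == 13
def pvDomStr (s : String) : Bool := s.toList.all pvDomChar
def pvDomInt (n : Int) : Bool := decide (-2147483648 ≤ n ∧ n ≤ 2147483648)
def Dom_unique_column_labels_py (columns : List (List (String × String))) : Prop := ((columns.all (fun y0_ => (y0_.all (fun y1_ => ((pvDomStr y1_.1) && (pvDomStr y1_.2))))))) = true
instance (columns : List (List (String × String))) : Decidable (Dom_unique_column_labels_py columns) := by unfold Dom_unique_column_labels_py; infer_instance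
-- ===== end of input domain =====

-- B replaces A's single streaming pass with a `seen` counter dict by a label-major two-phase
-- algorithm: collect the distinct labels once, then renumber each label's occurrences in its own
-- sweep (objective: alternative decomposition, not faster).  Both Pythons mutate the column dicts
-- in place and return the same list object; the equivalence proved here is about the RETURN value.

-- ===== PORT A =====
-- One pass threading the running `seen` counter dict.  Where the Python raises KeyError
-- (a column without a "label" key) the port reads "" instead; Pre_ excludes those inputs.
def uclA_go (seen : PySem.Dict String Int) : List (List (String × String)) → List (List (String × String))
  | [] => []
  | column :: rest =>
    let label := (PySem.Dict.mk column).getD "label" ""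
    let count := seen.getD label 0 + 1
    let seen' := seen.insert label count
    let column' := ((PySem.Dict.mk column).insert "import_label"
        (if count = 1 then label else label ++ "（" ++ PySem.Int.toStr count ++ "）")).items
    column' :: uclA_go seen' rest

def unique_column_labels_py (columns : List (List (String × String))) : List (List (String × String)) :=
  uclA_go PySem.Dict.empty columns

-- ===== PORT B =====
-- Phase 1: the distinct labels in first-occurrence order (dict.fromkeys = PySem.List.dedup).
-- Phase 2: one sweep per label, renumbering that label's occurrences.  Same KeyError remark
-- as for port A (excluded by Pre_).
def uclB_pass (label : String) (occurrence : Int) : List (List (String × String)) → List (List (String × String))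
  | [] => []
  | column :: rest =>
    if (PySem.Dict.mk column).getD "label" "" == label then
      (((PySem.Dict.mk column).insert "import_label"
          (if occurrence + 1 = 1 then label
           else label ++ "（" ++ PySem.Int.toStr (occurrence + 1) ++ "）")).items)
        :: uclB_pass label (occurrence + 1) rest
    else column :: uclB_pass label occurrence rest

def unique_column_labels_py_alt (columns : List (List (String × String))) : List (List (String × String)) :=
  (PySem.List.dedup (columns.map (fun column => (PySem.Dict.mk column).getD "label" ""))).foldl
    (fun acc label => uclB_pass label 0 acc) columns

-- ===== PRECONDITION & SPEC =====
-- Pre_ excludes exactly the inputs where the Python A raises KeyError: a column dict without a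
-- "label" key.
def Pre_unique_column_labels_py (columns : List (List (String × String))) : Prop :=
  ∀ column ∈ columns, (PySem.Dict.mk column).contains "label" = true
instance (columns : List (List (String × String))) : Decidable (Pre_unique_column_labels_py columns) := by unfold Pre_unique_column_labels_py; infer_instance

def pvWitness_unique_column_labels_py : (List (List (String × String))) :=
  [[("label", "a")], [("label", "a"), ("x", "y")], [("label", "b")]]

def Spec_unique_column_labels_py (columns : List (List (String × String))) (out : List (List (String × String))) : Prop := out = unique_column_labels_py_alt columns
instance (columns : List (List (String × String))) (out : List (List (String × String))) : Decidable (Spec_unique_column_labels_py columns out) := by unfold Spec_unique_column_labels_py; infer_instance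

-- ===== CLAIM (what is proved, stated in full; the proofs are below) =====
def Claim_equal_unique_column_labels_py : Prop := ∀ (columns : List (List (String × String))), Dom_unique_column_labels_py columns → Pre_unique_column_labels_py columns → Spec_unique_column_labels_py columns (unique_column_labels_py columns)

-- ===== LEMMAS AND PROOFS =====

-- the label a column carries (as both ports read it)
def pvLabel (column : List (String × String)) : String := (PySem.Dict.mk column).getD "label" ""

-- the updated column, given the label string l and the occurrence number n
def pvOutL (column : List (String × String)) (l : String) (n : Int) : List (String × String) :=
  ((PySem.Dict.mk column).insert "import_label"
      (if n = 1 then l else l ++ "（" ++ PySem.Int.toStr n ++ "）")).items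

def pvOut (column : List (String × String)) (n : Int) : List (String × String) :=
  pvOutL column (pvLabel column) n

lemma pvLabel_pvOutL (c : List (String × String)) (l : String) (n : Int) :
    pvLabel (pvOutL c l n) = pvLabel c := by
  show (PySem.Dict.mk (((PySem.Dict.mk c).insert "import_label" _).items)).getD "label" ""
      = (PySem.Dict.mk c).getD "label" ""
  show ((PySem.Dict.mk c).insert "import_label" _).getD "label" "" = _
  rw [PySem.Dict.getD_insert]
  simp

-- ----- A side -----
lemma uclA_go_length (cs : List (List (String × String))) :
    ∀ seen, (uclA_go seen cs).length = cs.length := by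
  induction cs with
  | nil => intro seen; simp [uclA_go]
  | cons c rest ih => intro seen; simp [uclA_go, ih]

lemma uclA_go_getElem? (cs : List (List (String × String))) :
    ∀ (seen : PySem.Dict String Int) (j : Nat) (hj : j < cs.length),
    (uclA_go seen cs)[j]? = some (pvOut cs[j]
      (seen.getD (pvLabel cs[j]) 0 + (((cs.map pvLabel).take j).count (pvLabel cs[j]) : Nat) + 1)) := by
  induction cs with
  | nil => intro seen j hj; simp at hj
  | cons c rest ih =>
    intro seen j hj
    cases j with
    | zero => simp [uclA_go, pvOut, pvOutL, pvLabel]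
    | succ j =>
      have hj' : j < rest.length := by simpa using hj
      simp only [uclA_go, List.getElem?_cons_succ, List.getElem_cons_succ,
        List.map_cons, List.take_succ_cons, List.count_cons]
      rw [ih _ j hj']
      have hlc : (PySem.Dict.mk c).getD "label" "" = pvLabel c := rfl
      rw [hlc]
      congr 1
      by_cases h : pvLabel c = pvLabel rest[j]
      · rw [h, PySem.Dict.getD_insert_self]
        congr 1
        simp only [BEq.rfl, if_pos]
        push_cast
        ring
      · rw [PySem.Dict.getD_insert_of_ne _ _ _ (fun e => h e.symm)]
        simp [h]

lemma count_take_succ (columns : List (List (String × String))) (j : Nat) (hj : j < columns.length) :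
    ((columns.map pvLabel).take (j + 1)).count (pvLabel columns[j])
      = ((columns.map pvLabel).take j).count (pvLabel columns[j]) + 1 := by
  rw [List.take_add_one]
  have : (columns.map pvLabel)[j]? = some (pvLabel columns[j]) := by
    simp [List.getElem?_map, List.getElem?_eq_getElem hj]
  rw [this]
  simp

-- ----- B side -----
lemma uclB_pass_length (l : String) (xs : List (List (String × String))) :
    ∀ k, (uclB_pass l k xs).length = xs.length := by
  induction xs with
  | nil => intro k; simp [uclB_pass]
  | cons c rest ih =>
    intro k
    by_cases h : (PySem.Dict.mk c).getD "label" "" == l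
    · simp [uclB_pass, h, ih]
    · simp [uclB_pass, h, ih]

lemma uclB_pass_getElem? (l : String) (xs : List (List (String × String))) :
    ∀ (k : Int) (j : Nat) (hj : j < xs.length),
    (uclB_pass l k xs)[j]? = some (if pvLabel xs[j] = l
      then pvOutL xs[j] l (k + (((xs.take (j + 1)).map pvLabel).count l : Nat))
      else xs[j]) := by
  induction xs with
  | nil => intro k j hj; simp at hj
  | cons c rest ih =>
    intro k j hj
    have hlc : (PySem.Dict.mk c).getD "label" "" = pvLabel c := rfl
    cases j with
    | zero =>
      by_cases h : pvLabel c = l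
      · simp [uclB_pass, hlc, h, pvOutL]
      · simp [uclB_pass, hlc, h]
    | succ j =>
      have hj' : j < rest.length := by simpa using hj
      by_cases h : pvLabel c = l
      · subst h
        simp only [uclB_pass, hlc, BEq.rfl, if_pos, List.getElem?_cons_succ,
          List.getElem_cons_succ, List.take_succ_cons, List.map_cons, List.count_cons]
        rw [ih (k + 1) j hj']
        congr 1
        by_cases h2 : pvLabel rest[j] = pvLabel c
        · simp only [h2, if_pos]
          congr 1
          push_cast
          ring
        · simp [h2]
      · have hb : ((pvLabel c == l) = false) := by simp [h]
        simp only [uclB_pass, hlc, hb, Bool.false_eq_true, if_false, List.getElem?_cons_succ,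
          List.getElem_cons_succ, List.take_succ_cons, List.map_cons, List.count_cons]
        rw [ih k j hj']
        simp

lemma uclB_fold_inv (columns : List (List (String × String))) (ls : List String) :
    ∀ (done : List String) (acc : List (List (String × String))),
    (done ++ ls).Nodup →
    acc.length = columns.length →
    (∀ (j : Nat) (hj : j < columns.length), acc[j]? = some
      (if pvLabel columns[j] ∈ done
       then pvOut columns[j] ((((columns.map pvLabel).take (j + 1)).count (pvLabel columns[j]) : Nat) : Int)
       else columns[j])) →
    ∀ (j : Nat) (hj : j < columns.length),
    (ls.foldl (fun a l => uclB_pass l 0 a) acc)[j]? = some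
      (if pvLabel columns[j] ∈ done ++ ls
       then pvOut columns[j] ((((columns.map pvLabel).take (j + 1)).count (pvLabel columns[j]) : Nat) : Int)
       else columns[j]) := by
  induction ls with
  | nil =>
    intro done acc hnd hlen H j hj
    simpa using H j hj
  | cons l ls ih =>
    intro done acc hnd hlen H j hj
    -- labels of acc agree with labels of columns
    have hlab : acc.map pvLabel = columns.map pvLabel := by
      apply List.ext_getElem?
      intro i
      by_cases hi : i < columns.length
      · rw [List.getElem?_map, List.getElem?_map, H i hi, List.getElem?_eq_getElem hi]
        simp only [Option.map_some]
        congr 1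
        split
        · exact pvLabel_pvOutL _ _ _
        · rfl
      · rw [List.getElem?_eq_none, List.getElem?_eq_none]
        · simp; omega
        · simp [hlen]; omega
    have hlnotdone : l ∉ done := fun hmem =>
      (List.disjoint_of_nodup_append hnd) hmem (by simp)
    have hnd' : ((done ++ [l]) ++ ls).Nodup := by
      have : done ++ l :: ls = (done ++ [l]) ++ ls := by simp
      rw [← this]; exact hnd
    have hlen' : (uclB_pass l 0 acc).length = columns.length := by
      rw [uclB_pass_length]; exact hlen
    have H' : ∀ (j : Nat) (hj : j < columns.length), (uclB_pass l 0 acc)[j]? = some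
        (if pvLabel columns[j] ∈ done ++ [l]
         then pvOut columns[j] ((((columns.map pvLabel).take (j + 1)).count (pvLabel columns[j]) : Nat) : Int)
         else columns[j]) := by
      intro j hj
      have hja : j < acc.length := by omega
      rw [uclB_pass_getElem? l acc 0 j hja]
      have haccj : acc[j]? = some acc[j] := List.getElem?_eq_getElem hja
      have hacc := H j hj
      rw [haccj] at hacc
      have haccj_eq : acc[j] = (if pvLabel columns[j] ∈ done
          then pvOut columns[j] ((((columns.map pvLabel).take (j + 1)).count (pvLabel columns[j]) : Nat) : Int)
          else columns[j]) := by exact Option.some.inj hacc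
      have hlabj : pvLabel acc[j] = pvLabel columns[j] := by
        rw [haccj_eq]
        split
        · exact pvLabel_pvOutL _ _ _
        · rfl
      have hcnt : (acc.take (j + 1)).map pvLabel = ((columns.map pvLabel).take (j + 1)) := by
        rw [List.map_take, hlab, ← List.map_take]
      congr 1
      by_cases hc : pvLabel columns[j] = l
      · rw [if_pos (by rw [hlabj]; exact hc), if_pos (by simp [hc])]
        have : pvLabel columns[j] ∉ done := hc ▸ hlnotdone
        rw [haccj_eq, if_neg this]
        rw [hcnt, zero_add]
        unfold pvOut
        rw [hc]
      · rw [if_neg (by rw [hlabj]; exact hc)]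
        rw [haccj_eq]
        have : (pvLabel columns[j] ∈ done ++ [l]) ↔ (pvLabel columns[j] ∈ done) := by
          simp [hc]
        by_cases hd : pvLabel columns[j] ∈ done
        · rw [if_pos hd, if_pos (this.mpr hd)]
        · rw [if_neg hd, if_neg (fun hm => hd (this.mp hm))]
    have := ih (done ++ [l]) (uclB_pass l 0 acc) hnd' hlen' H' j hj
    simp only [List.foldl_cons]
    rw [this]
    congr 1
    have hmemiff : (pvLabel columns[j] ∈ (done ++ [l]) ++ ls) ↔ (pvLabel columns[j] ∈ done ++ l :: ls) := by
      simp
    by_cases hm : pvLabel columns[j] ∈ (done ++ [l]) ++ ls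
    · rw [if_pos hm, if_pos (hmemiff.mp hm)]
    · rw [if_neg hm, if_neg (fun h => hm (hmemiff.mpr h))]

-- ===== VERDICT (by name: the statement is the Claim_ definition above) =====
theorem unique_column_labels_py_spec : Claim_equal_unique_column_labels_py := by
  intro columns _hdom _hpre
  show unique_column_labels_py columns = unique_column_labels_py_alt columns
  have hlenA : (unique_column_labels_py columns).length = columns.length :=
    uclA_go_length columns _
  have hlabels : columns.map (fun column => (PySem.Dict.mk column).getD "label" "")
      = columns.map pvLabel := rfl
  have hfoldlen : ∀ (ls : List String) (acc : List (List (String × String))),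
      (ls.foldl (fun a l => uclB_pass l 0 a) acc).length = acc.length := by
    intro ls
    induction ls with
    | nil => intro acc; simp
    | cons l ls ih => intro acc; simp only [List.foldl_cons]; rw [ih, uclB_pass_length]
  have hlenB : (unique_column_labels_py_alt columns).length = columns.length := by
    unfold unique_column_labels_py_alt
    rw [hfoldlen]
  apply List.ext_getElem?
  intro j
  by_cases hj : j < columns.length
  · unfold unique_column_labels_py
    rw [uclA_go_getElem? columns _ j hj]
    unfold unique_column_labels_py_alt
    rw [hlabels]
    have hfold := uclB_fold_inv columns (PySem.List.dedup (columns.map pvLabel)) [] columns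
      (by simp)
      rfl
      (by intro j hj; simp [List.getElem?_eq_getElem hj])
      j hj
    simp only [List.nil_append] at hfold
    rw [hfold]
    have hmem : pvLabel columns[j] ∈ PySem.List.dedup (columns.map pvLabel) := by
      rw [PySem.List.mem_dedup]
      exact List.mem_map_of_mem (List.getElem_mem hj)
    rw [if_pos hmem]
    congr 2
    rw [count_take_succ columns j hj]
    simp only [PySem.Dict.getD_empty]
    push_cast
    ring
  · rw [List.getElem?_eq_none (by omega : (unique_column_labels_py columns).length ≤ j)]
    rw [List.getElem?_eq_none (by omega : (unique_column_labels_py_alt columns).length ≤ j)]
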